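-- pv_equiv track=rewrite | github.com/mkhai9x/CSEUNSW | ICPC/Cameras/camera.py | solution
-- ===== SOURCE A (Python) =====
-- def solution(arrayNum, _range):
--     index = 1
--     temp = arrayNum
--     total = 0
--     for house in arrayNum[1:]:
--         numCamera = 0
--         for count in range(_range):
--             position = index+count
--             if position < len(temp) and temp[position] :
--                 numCamera+=1
--         if (index + _range - 1) < len(temp) and numCamera<2:
--             temp[index+_range-1] = True
--             total+=1
--         index+=1
--     return total
-- ===== SOURCE B (Python) =====
-- # O(n) sliding window: the number of cameras visible from the current house is
-- # kept as a running sum, updated as the window slides and when a camera is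
-- # installed at its right edge.  Mutates arrayNum in place (marks installations).
-- def solution(arrayNum, _range):
--     n = len(arrayNum)
--     s = sum(arrayNum[1:1 + _range])
--     total = 0
--     for index in range(1, n):
--         edge = index + _range - 1
--         if edge < n and s < 2:
--             if not arrayNum[edge]:
--                 arrayNum[edge] = True
--                 s += 1
--             total += 1
--         if arrayNum[index]:
--             s -= 1
--         if index + _range < n and arrayNum[index + _range]:
--             s += 1
--     return total
-- ===== Notes on version B (the rewrite author's own statement) =====
-- stated objective: faster
-- what changed: Replaces A's O(_range) rescan of the coverage window at every house by a single incrementally maintained window sum; Pre_ restricts _range to the natural domain of a positive coverage range (except when len<=1, where the loop never runs), since for non-positive _range on longer arrays A raises IndexError or installs cameras through Python negative-index wraparound.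
-- outside the precondition, e.g. on solution([True, False, False], -1): A returns 2, B returns 1
import Mathlib
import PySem

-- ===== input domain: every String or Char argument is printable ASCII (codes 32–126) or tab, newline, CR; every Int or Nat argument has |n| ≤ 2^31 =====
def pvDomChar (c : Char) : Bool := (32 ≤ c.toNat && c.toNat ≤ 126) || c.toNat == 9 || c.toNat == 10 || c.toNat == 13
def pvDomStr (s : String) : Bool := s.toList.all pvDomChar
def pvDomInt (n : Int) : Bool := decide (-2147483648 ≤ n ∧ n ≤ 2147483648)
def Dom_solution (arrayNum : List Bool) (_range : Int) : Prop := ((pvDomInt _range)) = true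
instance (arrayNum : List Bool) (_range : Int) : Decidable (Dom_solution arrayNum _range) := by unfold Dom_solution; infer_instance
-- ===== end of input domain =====

-- B replaces A's per-house rescan of the coverage window by an incrementally maintained
-- window sum (objective: faster).  Both Pythons mutate arrayNum in place identically on
-- Pre_; the equivalence proved here is about the return value.

-- ===== PORT A =====
-- loop body of A's 'for house in arrayNum[1:]' over state (temp, index, total)
def pvAstep (_range : Int) (st : List Bool × Int × Int) (_house : Bool) : List Bool × Int × Int :=
  let temp := st.1
  let index := st.2.1
  let total := st.2.2
  let numCamera : Int := (PySem.List.pyRange 0 _range 1).foldl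
    (fun nc count =>
      let position := index + count
      if position < (temp.length : Int) ∧ PySem.List.pyGetD temp position false = true
      then nc + 1 else nc) 0
  if index + _range - 1 < (temp.length : Int) ∧ numCamera < 2 then
    (PySem.List.pySetD temp (index + _range - 1) true, index + 1, total + 1)
  else (temp, index + 1, total)

def solution (arrayNum : List Bool) (_range : Int) : Int :=
  ((PySem.List.slice arrayNum (some 1) none).foldl (pvAstep _range) (arrayNum, 1, 0)).2.2

-- ===== PORT B =====
-- loop body of B's 'for index in range(1, n)' over state (arr, s, total)
def pvBstep (n _range : Int) (st : List Bool × Int × Int) (index : Int) : List Bool × Int × Int :=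
  let edge := index + _range - 1
  let st1 : List Bool × Int × Int :=
    if edge < n ∧ st.2.1 < 2 then
      if PySem.List.pyGetD st.1 edge false = false then
        (PySem.List.pySetD st.1 edge true, st.2.1 + 1, st.2.2 + 1)
      else (st.1, st.2.1, st.2.2 + 1)
    else (st.1, st.2.1, st.2.2)
  let s2 := if PySem.List.pyGetD st1.1 index false = true then st1.2.1 - 1 else st1.2.1
  let s3 := if index + _range < n ∧ PySem.List.pyGetD st1.1 (index + _range) false = true
            then s2 + 1 else s2
  (st1.1, s3, st1.2.2)

def solution_alt (arrayNum : List Bool) (_range : Int) : Int :=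
  let n : Int := arrayNum.length
  let s0 : Int := (PySem.List.slice arrayNum (some 1) (some (1 + _range))).foldl
    (fun acc b => acc + if b then 1 else 0) 0
  ((PySem.List.pyRange 1 n 1).foldl (pvBstep n _range) (arrayNum, s0, 0)).2.2

-- ===== PRECONDITION & SPEC =====
-- Pre_ keeps the natural domain of the task, a positive coverage range (vacuously also
-- lists of length ≤ 1, where the loop never runs): for _range ≤ 0 on longer lists A
-- either raises IndexError or writes through Python negative-index wraparound.
def Pre_solution (arrayNum : List Bool) (_range : Int) : Prop :=
  arrayNum.length ≤ 1 ∨ 1 ≤ _range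
instance (arrayNum : List Bool) (_range : Int) : Decidable (Pre_solution arrayNum _range) := by
  unfold Pre_solution; infer_instance

def pvWitness_solution : List Bool × Int := ([true, false, false, true, false], 2)

def Spec_solution (arrayNum : List Bool) (_range : Int) (out : Int) : Prop := out = solution_alt arrayNum _range
instance (arrayNum : List Bool) (_range : Int) (out : Int) : Decidable (Spec_solution arrayNum _range out) := by
  unfold Spec_solution; infer_instance

-- ===== CLAIM (what is proved, stated in full; the proofs are below) =====
def Claim_equal_solution : Prop := ∀ (arrayNum : List Bool) (_range : Int), Dom_solution arrayNum _range → Pre_solution arrayNum _range → Spec_solution arrayNum _range (solution arrayNum _range)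

-- ===== LEMMAS AND PROOFS =====

-- number of cameras visible in the window of length rn starting at house i
def pvW (arr : List Bool) (i rn : Nat) : Int :=
  ∑ k ∈ Finset.range rn, (if arr.getD (i + k) false then 1 else 0)

def pvAgo (r : Int) (st : List Bool × Int × Int) : List Bool × Int × Int := pvAstep r st true

-- a foldl over a list that ignores its elements only iterates the state update
lemma pv_foldl_ignore {α β : Type} (g : β → β) : ∀ (l : List α) (st : β),
    l.foldl (fun s _ => g s) st = g^[l.length] st := by
  intro l
  induction l with
  | nil => intro st; rfl
  | cons a l ih =>
      intro st
      simp [List.foldl_cons, ih, Function.iterate_succ_apply]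

lemma pv_foldl_sum_ite : ∀ (l : List Bool) (c : Int),
    l.foldl (fun acc b => acc + if b then 1 else 0) c = c + ((l.countP id) : Int) := by
  intro l
  induction l with
  | nil => intro c; simp
  | cons a l ih =>
      intro c
      cases a <;> simp [List.countP_cons, ih] <;> push_cast <;> ring

lemma pv_getD_oor (arr : List Bool) (m : Nat) (h : arr.length ≤ m) :
    arr.getD m false = false :=
  List.getD_eq_default _ _ h

-- A's inner loop computes the window sum
lemma pv_inner_eq (arr : List Bool) (i : Nat) : ∀ rn : Nat,
    (PySem.List.pyRange 0 (rn : Int) 1).foldl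
      (fun nc count =>
        if (i : Int) + count < (arr.length : Int) ∧
            PySem.List.pyGetD arr ((i : Int) + count) false = true
        then nc + 1 else nc) (0 : Int) = pvW arr i rn := by
  intro rn
  induction rn with
  | zero =>
      rw [PySem.List.pyRange_one_eq_nil (by norm_num)]
      simp [pvW]
  | succ rn ih =>
      rw [show ((rn + 1 : Nat) : Int) = (rn : Int) + 1 by push_cast; ring]
      rw [PySem.List.pyRange_one_succ_right (by positivity), List.foldl_append, ih]
      simp only [List.foldl_cons, List.foldl_nil]
      have hg : PySem.List.pyGetD arr ((i : Int) + (rn : Int)) false = arr.getD (i + rn) false := by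
        rw [show ((i : Int) + (rn : Int)) = ((i + rn : Nat) : Int) by push_cast; ring,
          PySem.List.pyGetD_natCast]
      rw [show pvW arr i (rn + 1)
          = pvW arr i rn + (if arr.getD (i + rn) false then 1 else 0)
        from Finset.sum_range_succ _ rn]
      rw [hg]
      by_cases h : i + rn < arr.length
      · have hlt : (i : Int) + (rn : Int) < (arr.length : Int) := by omega
        by_cases hb : arr.getD (i + rn) false = true
        · rw [if_pos ⟨hlt, hb⟩, if_pos hb]
        · rw [if_neg (by tauto), if_neg hb]
          ring
      · have hd : arr.getD (i + rn) false = false := pv_getD_oor arr _ (by omega)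
        have hb : ¬ arr.getD (i + rn) false = true := by rw [hd]; simp
        rw [if_neg (by tauto), if_neg hb]
        ring

-- B's initial slice sum is the window sum
lemma pv_countP_take_drop (arr : List Bool) (i : Nat) : ∀ rn : Nat,
    ((((arr.drop i).take rn).countP id : Nat) : Int) = pvW arr i rn := by
  intro rn
  induction rn with
  | zero => simp [pvW]
  | succ rn ih =>
      rw [List.take_add_one, List.countP_append]
      rw [show pvW arr i (rn + 1)
          = pvW arr i rn + (if arr.getD (i + rn) false then 1 else 0)
        from Finset.sum_range_succ _ rn]
      rw [← ih]
      push_cast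
      congr 1
      rw [List.getElem?_drop]
      by_cases h : i + rn < arr.length
      · rw [List.getElem?_eq_getElem h]
        have hgd : arr.getD (i + rn) false = arr[i + rn] := List.getD_eq_getElem arr false h
        rw [hgd]
        cases hb : arr[i + rn] <;> simp [hb]
      · rw [List.getElem?_eq_none (by omega)]
        have hd : arr.getD (i + rn) false = false := pv_getD_oor arr _ (by omega)
        rw [hd]
        simp

-- setting an in-window false entry to true raises the window sum by one
lemma pv_W_flip (arr : List Bool) (i rn e : Nat) (h1 : i ≤ e) (h2 : e < i + rn)
    (h3 : e < arr.length) (h4 : arr.getD e false = false) :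
    pvW (arr.set e true) i rn = pvW arr i rn + 1 := by
  unfold pvW
  have key : ∀ k ∈ Finset.range rn,
      (if (arr.set e true).getD (i + k) false then (1:Int) else 0)
        = (if arr.getD (i + k) false then (1:Int) else 0) + (if k = e - i then 1 else 0) := by
    intro k _
    by_cases hk : i + k = e
    · have hk' : k = e - i := by omega
      have hset : (arr.set e true).getD (i + k) false = true := by
        rw [hk, List.getD_eq_getElem?_getD, List.getElem?_set_self h3]
        rfl
      rw [hk] at hset ⊢
      rw [hk']
      simp only [hset, h4]
      norm_num
    · have hk' : ¬ k = e - i := by omega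
      have hne : (arr.set e true).getD (i + k) false = arr.getD (i + k) false := by
        rw [List.getD_eq_getElem?_getD, List.getD_eq_getElem?_getD,
          List.getElem?_set_ne (show e ≠ i + k by omega)]
      rw [hne]
      simp [hk']
  rw [Finset.sum_congr rfl key, Finset.sum_add_distrib, Finset.sum_ite_eq']
  rw [if_pos (Finset.mem_range.mpr (by omega))]

lemma pv_W_set_noop (arr : List Bool) (e : Nat) (h : arr.getD e false = true) :
    arr.set e true = arr := by
  have he : e < arr.length := by
    by_contra hc
    rw [pv_getD_oor arr e (by omega)] at h
    exact absurd h (by simp)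
  apply List.ext_getElem?
  intro n
  rw [List.getElem?_set]
  by_cases hn : e = n
  · subst hn
    rw [if_pos rfl, if_pos he, List.getElem?_eq_getElem he]
    rw [List.getD_eq_getElem arr false he] at h
    rw [h]
  · rw [if_neg hn]

-- sliding the window one house to the right
lemma pv_W_shift (arr : List Bool) (i rn : Nat) :
    pvW arr (i + 1) rn
      = pvW arr i rn + (if arr.getD (i + rn) false then 1 else 0)
        - (if arr.getD i false then 1 else 0) := by
  have h1 := Finset.sum_range_succ (fun k => if arr.getD (i + k) false then (1:Int) else 0) rn
  have h2 := Finset.sum_range_succ' (fun k => if arr.getD (i + k) false then (1:Int) else 0) rn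
  have h3 : pvW arr (i + 1) rn
      = ∑ k ∈ Finset.range rn, (if arr.getD (i + (k + 1)) false then (1:Int) else 0) := by
    unfold pvW
    exact Finset.sum_congr rfl (fun k _ => by rw [show i + 1 + k = i + (k + 1) by omega])
  unfold pvW at *
  simp only [Nat.add_zero] at h2
  rw [h3]
  omega

-- B's post-write window-slide bookkeeping computes the next window sum
lemma pv_slide (arr2 : List Bool) (i rn : Nat) (s n : Int) (hs : s = pvW arr2 i rn)
    (hn : n = (arr2.length : Int)) :
    (if ((i:Int) + (rn:Int)) < n ∧ PySem.List.pyGetD arr2 ((i:Int) + (rn:Int)) false = true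
     then (if PySem.List.pyGetD arr2 (i:Int) false = true then s - 1 else s) + 1
     else (if PySem.List.pyGetD arr2 (i:Int) false = true then s - 1 else s))
      = pvW arr2 (i + 1) rn := by
  subst hn hs
  have hgi : PySem.List.pyGetD arr2 ((i:Int)) false = arr2.getD i false :=
    PySem.List.pyGetD_natCast arr2 i false
  have hge : PySem.List.pyGetD arr2 ((i:Int) + (rn:Int)) false = arr2.getD (i + rn) false := by
    rw [show ((i:Int) + (rn:Int)) = ((i + rn : Nat) : Int) by push_cast; ring,
      PySem.List.pyGetD_natCast]
  rw [pv_W_shift, hgi, hge]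
  by_cases h : i + rn < arr2.length
  · have hc : (((i:Int) + (rn:Int)) < (arr2.length : Int) ∧ arr2.getD (i + rn) false = true)
        ↔ (arr2.getD (i + rn) false = true) :=
      ⟨fun x => x.2, fun x => ⟨by omega, x⟩⟩
    rw [if_congr hc rfl rfl]
    split_ifs <;> ring
  · have hd : arr2.getD (i + rn) false = false := pv_getD_oor arr2 _ (by omega)
    have hb : ¬ arr2.getD (i + rn) false = true := by rw [hd]; simp
    rw [if_neg (fun x => hb x.2), if_neg hb]
    split_ifs <;> ring

-- one loop iteration of A matches one loop iteration of B
lemma pv_step_match (r : Int) (hr : 1 ≤ r) (arr : List Bool) (i : Nat) (t : Int)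
    (h2 : i < arr.length) (house : Bool) :
    ∃ arr2 t2, pvAstep r (arr, (i : Int), t) house = (arr2, (i : Int) + 1, t2)
      ∧ pvBstep (arr.length : Int) r (arr, pvW arr i r.toNat, t) (i : Int)
          = (arr2, pvW arr2 (i + 1) r.toNat, t2)
      ∧ arr2.length = arr.length := by
  have hr0 : (0:Int) ≤ r := by omega
  have hrc : r = (r.toNat : Int) := (Int.toNat_of_nonneg hr0).symm
  set rn := r.toNat with hrn
  have hrn1 : 1 ≤ rn := by omega
  have hfold : (PySem.List.pyRange 0 r 1).foldl
      (fun nc count =>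
        if (i : Int) + count < (arr.length : Int) ∧
            PySem.List.pyGetD arr ((i : Int) + count) false = true
        then nc + 1 else nc) (0 : Int) = pvW arr i rn := by
    rw [hrc]
    exact pv_inner_eq arr i rn
  have hcast1 : ((i : Int) + r - 1) = ((i + rn - 1 : Nat) : Int) := by omega
  have hge : PySem.List.pyGetD arr ((i : Int) + r - 1) false = arr.getD (i + rn - 1) false := by
    rw [hcast1, PySem.List.pyGetD_natCast]
  by_cases hc : ((i : Int) + r - 1 < (arr.length : Int) ∧ pvW arr i rn < 2)
  · by_cases hg : arr.getD (i + rn - 1) false = true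
    · -- camera slot already occupied: A writes True over True (a no-op), B skips the write
      refine ⟨arr, t + 1, ?_, ?_, rfl⟩
      · simp only [pvAstep]
        rw [hfold, if_pos hc, hcast1, PySem.List.pySetD_natCast,
          pv_W_set_noop arr (i + rn - 1) hg]
      · simp only [pvBstep]
        rw [if_pos hc, hge, if_neg (by rw [hg]; simp)]
        simp only [Prod.mk.injEq]
        refine ⟨trivial, ?_, trivial⟩
        rw [hrc]
        exact pv_slide arr i rn _ _ rfl rfl
    · refine ⟨arr.set (i + rn - 1) true, t + 1, ?_, ?_, by simp⟩
      · simp only [pvAstep]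
        rw [hfold, if_pos hc, hcast1, PySem.List.pySetD_natCast]
      · simp only [pvBstep]
        have hgf : arr.getD (i + rn - 1) false = false := by
          revert hg; cases arr.getD (i + rn - 1) false <;> simp
        rw [if_pos hc, hge, if_pos hgf, hcast1, PySem.List.pySetD_natCast]
        simp only [Prod.mk.injEq]
        refine ⟨trivial, ?_, trivial⟩
        rw [hrc]
        refine pv_slide _ i rn _ _ ?_ (by simp)
        rw [pv_W_flip arr i rn (i + rn - 1) (by omega) (by omega) (by omega)
          (by simpa using hg)]
  · refine ⟨arr, t, ?_, ?_, rfl⟩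
    · simp only [pvAstep]
      rw [hfold, if_neg hc]
    · simp only [pvBstep]
      rw [if_neg hc]
      simp only [Prod.mk.injEq]
      refine ⟨trivial, ?_, trivial⟩
      rw [hrc]
      exact pv_slide arr i rn _ _ rfl rfl

lemma pv_loop_eq (r : Int) (hr : 1 ≤ r) (n : Nat) : ∀ (m i : Nat) (arr : List Bool) (t : Int),
    arr.length = n → i + m = n →
    ((pvAgo r)^[m] (arr, (i : Int), t)).2.2
      = ((PySem.List.pyRange (i : Int) (n : Int) 1).foldl (pvBstep (n : Int) r)
          (arr, pvW arr i r.toNat, t)).2.2 := by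
  intro m
  induction m with
  | zero =>
      intro i arr t hlen hi
      rw [PySem.List.pyRange_one_eq_nil (by omega)]
      rfl
  | succ m ih =>
      intro i arr t hlen hi
      have hlt : i < arr.length := by omega
      obtain ⟨arr2, t2, hA, hB, hl2⟩ := pv_step_match r hr arr i t hlt true
      rw [PySem.List.pyRange_one_cons (by omega)]
      rw [List.foldl_cons, Function.iterate_succ_apply]
      have hgo : pvAgo r (arr, (i : Int), t) = (arr2, (i : Int) + 1, t2) := hA
      rw [hgo]
      rw [hlen] at hB
      rw [hB]
      rw [show ((i : Int) + 1) = (((i + 1 : Nat)) : Int) by push_cast; ring]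
      exact ih (i + 1) arr2 t2 (by omega) (by omega)

lemma pv_foldA (r : Int) (l : List Bool) (st : List Bool × Int × Int) :
    l.foldl (pvAstep r) st = (pvAgo r)^[l.length] st :=
  pv_foldl_ignore (pvAgo r) l st

-- with a positive range the two programs agree (the main argument)
lemma pv_main (arr : List Bool) (r : Int) (hr1 : 1 ≤ r) :
    solution arr r = solution_alt arr r := by
  unfold solution solution_alt
  rw [PySem.List.slice_from_one, pv_foldA]
  cases arr with
  | nil => rfl
  | cons a l =>
      simp only [List.tail_cons, List.length_cons]
      have hs0 : (PySem.List.slice (a :: l) (some 1) (some (1 + r))).foldl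
          (fun acc b => acc + if b then 1 else 0) (0:Int) = pvW (a :: l) 1 r.toNat := by
        rw [PySem.List.slice_toNat _ (by norm_num) (by omega)]
        rw [pv_foldl_sum_ite, zero_add]
        rw [show (1 + r).toNat - (1:Int).toNat = r.toNat by omega]
        rw [show (1:Int).toNat = 1 from rfl]
        exact pv_countP_take_drop (a :: l) 1 r.toNat
      rw [hs0]
      have hmain := pv_loop_eq r hr1 (l.length + 1) l.length 1 (a :: l) 0
        (by simp) (by omega)
      rw [show ((1 : Nat) : Int) = (1 : Int) by norm_num] at hmain
      rw [show (((l.length + 1 : Nat)) : Int) = ((l.length : Int) + 1) by push_cast; ring] at hmain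
      simpa using hmain

-- ===== VERDICT (by name: the statement is the Claim_ definition above) =====
theorem solution_spec : Claim_equal_solution := by
  intro arr r _dom hpre
  unfold Spec_solution
  rcases hpre with hlen | hr1
  · -- loop never runs: both sides return 0
    match arr, hlen with
    | [], _ =>
        unfold solution solution_alt
        rw [PySem.List.slice_from_one]
        simp only [List.tail_nil, List.foldl_nil, List.length_nil]
        rw [show ((0 : Nat) : Int) = (0 : Int) by norm_num,
          PySem.List.pyRange_one_eq_nil (by norm_num)]
        rfl
    | [a], _ =>
        unfold solution solution_alt
        rw [PySem.List.slice_from_one]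
        simp only [List.tail_cons, List.foldl_nil, List.length_cons, List.length_nil]
        rw [show ((0 + 1 : Nat) : Int) = (1 : Int) by norm_num,
          PySem.List.pyRange_one_eq_nil (by norm_num)]
        rfl
  · exact pv_main arr r hr1
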